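-- pv_equiv track=rewrite | github.com/KoJootti/advent24 | 1/1.py | calc_total_distance_and_similarity_score
-- ===== SOURCE A (Python) =====
-- def get_smallest_unused_number(input_l: list[int], used_indeces: list) -> tuple[int | None, int | None]:
--     smallest = None
--     smallest_index = None
--     for i in range(len(input_l)):
--         if i in used_indeces:
--             continue
--
--         if smallest is None:
--             smallest = input_l[i]
--             smallest_index = i
--             continue
--
--         if input_l[i] < smallest:
--             smallest = input_l[i]
--             smallest_index = i
--
--     return smallest, smallest_index
--
-- def calc_total_distance_and_similarity_score(l1: list[int], l2: list[int]) -> tuple[int, int]: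
--     total_distance = 0
--     total_similarity_score = 0
--     l1_used_indeces = []
--     l2_used_indeces = []
--     for i in range(len(l1)):
--         smallest_l1, smallest_l1_index = get_smallest_unused_number(l1, l1_used_indeces)
--         smallest_l2, smallest_l2_index = get_smallest_unused_number(l2, l2_used_indeces)
--         if smallest_l1 is None or smallest_l2 is None:
--             break
--
--         l1_used_indeces.append(smallest_l1_index)
--         l2_used_indeces.append(smallest_l2_index)
--         distance = abs(smallest_l1 - smallest_l2)
--         total_distance += distance
--         # Similarity score
--         val = l1[i]
--         occ = l2.count(val)
--         total_similarity_score += (val * occ)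
--
--     return total_distance, total_similarity_score
-- ===== SOURCE B (Python) =====
-- def calc_total_distance_and_similarity_score(l1: list[int], l2: list[int]) -> tuple[int, int]:
--     s1 = sorted(l1)
--     s2 = sorted(l2)
--     total_distance = 0
--     for a, b in zip(s1, s2):
--         total_distance += abs(a - b)
--     counts = {}
--     for x in l2:
--         counts[x] = counts.get(x, 0) + 1
--     k = min(len(l1), len(l2))
--     total_similarity_score = 0
--     for x in l1[:k]:
--         total_similarity_score += x * counts.get(x, 0)
--     return total_distance, total_similarity_score
-- ===== Notes on version B (the rewrite author's own statement) =====
-- stated objective: faster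
-- what changed: Replaces the repeated scan-for-smallest-unused-index selection (with linear membership tests) and the per-iteration l2.count scan by sorting both lists once and zipping for the distance, plus a count dictionary built in one pass over l2 for the similarity score.
import Mathlib
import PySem

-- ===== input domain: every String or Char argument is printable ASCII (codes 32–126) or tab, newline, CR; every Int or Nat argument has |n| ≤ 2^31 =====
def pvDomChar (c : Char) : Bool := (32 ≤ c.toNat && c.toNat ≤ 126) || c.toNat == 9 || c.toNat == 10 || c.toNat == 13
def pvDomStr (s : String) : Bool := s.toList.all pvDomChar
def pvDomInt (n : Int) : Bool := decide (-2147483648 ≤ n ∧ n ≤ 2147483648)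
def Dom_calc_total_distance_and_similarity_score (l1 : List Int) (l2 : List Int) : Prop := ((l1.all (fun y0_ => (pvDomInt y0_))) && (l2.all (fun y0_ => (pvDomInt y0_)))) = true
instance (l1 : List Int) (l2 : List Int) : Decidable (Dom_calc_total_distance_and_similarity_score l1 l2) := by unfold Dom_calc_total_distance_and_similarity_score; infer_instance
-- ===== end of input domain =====

-- B replaces A's cubic smallest-unused-index selection and per-step l2.count by sort-both-and-zip
-- plus a one-pass count dictionary (objective: faster).

-- ===== PORT A =====
-- loop body of get_smallest_unused_number once an index is not skipped
def pvGsunStep (l : List Int) (st : Option Int × Option Int) (i : Int) : Option Int × Option Int :=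
  match st.1 with
  | none => (some (PySem.List.pyGetD l i 0), some i)
  | some s =>
    if PySem.List.pyGetD l i 0 < s then (some (PySem.List.pyGetD l i 0), some i) else st

-- get_smallest_unused_number
def pyGsun (l : List Int) (used : List Int) : Option Int × Option Int :=
  (PySem.List.pyRange 0 (l.length : Int) 1).foldl
    (fun st i => if i ∈ used then st else pvGsunStep l st i) (none, none)

-- main loop of A; Python's `break` is modelled by returning the accumulators
-- (the index option is `some` whenever the value option is, so `.getD 0` never supplies its default)
def pvCalcLoopA (l1 l2 : List Int) : List Int → Int → Int → List Int → List Int → Int × Int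
  | [], td, ts, _, _ => (td, ts)
  | i :: rest, td, ts, u1, u2 =>
    let r1 := pyGsun l1 u1
    let r2 := pyGsun l2 u2
    match r1.1, r2.1 with
    | some a, some b =>
      let val := PySem.List.pyGetD l1 i 0
      let occ := PySem.List.count l2 val
      pvCalcLoopA l1 l2 rest (td + |a - b|) (ts + val * occ) (u1 ++ [r1.2.getD 0]) (u2 ++ [r2.2.getD 0])
    | _, _ => (td, ts)

def calc_total_distance_and_similarity_score (l1 : List Int) (l2 : List Int) : Int × Int :=
  pvCalcLoopA l1 l2 (PySem.List.pyRange 0 (l1.length : Int) 1) 0 0 [] []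

-- ===== PORT B =====
def calc_total_distance_and_similarity_score_alt (l1 : List Int) (l2 : List Int) : Int × Int :=
  let s1 := PySem.List.sorted l1 (fun x => x) false
  let s2 := PySem.List.sorted l2 (fun x => x) false
  let td := (s1.zip s2).foldl (fun acc p => acc + |p.1 - p.2|) 0
  let counts := l2.foldl (fun d x => d.insert x (d.getD x 0 + 1)) (PySem.Dict.empty : PySem.Dict Int Int)
  let k : Int := min (l1.length : Int) (l2.length : Int)
  let ts := (PySem.List.slice l1 none (some k)).foldl (fun acc x => acc + x * counts.getD x 0) 0
  (td, ts)

-- ===== PRECONDITION & SPEC =====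
def Spec_calc_total_distance_and_similarity_score (l1 : List Int) (l2 : List Int) (out : Int × Int) : Prop := out = calc_total_distance_and_similarity_score_alt l1 l2
instance (l1 : List Int) (l2 : List Int) (out : Int × Int) : Decidable (Spec_calc_total_distance_and_similarity_score l1 l2 out) := by unfold Spec_calc_total_distance_and_similarity_score; infer_instance

-- ===== CLAIM (what is proved, stated in full; the proofs are below) =====
def Claim_equal_calc_total_distance_and_similarity_score : Prop := ∀ (l1 : List Int) (l2 : List Int), Dom_calc_total_distance_and_similarity_score l1 l2 → Spec_calc_total_distance_and_similarity_score l1 l2 (calc_total_distance_and_similarity_score l1 l2)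

-- ===== LEMMAS AND PROOFS =====

-- value of l at (in-range) index i
def pvAt (l : List Int) (i : Int) : Int := PySem.List.pyGetD l i 0

-- indices of l not yet used, in order
def pvUnusedIdx (l u : List Int) : List Int :=
  (PySem.List.pyRange 0 (l.length : Int) 1).filter (fun i => decide (i ∉ u))

-- values of l at the unused indices, in order
def pvUnusedVals (l u : List Int) : List Int := (pvUnusedIdx l u).map (pvAt l)

theorem pv_sorted_nil : PySem.List.sorted ([] : List Int) (fun x => x) false = [] := rfl

-- ghost recursion: A's loop driven by the sorted remaining value lists
def pvGhost (l1 l2 : List Int) : List Int → List Int → List Int → Int × Int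
  | [], _, _ => (0, 0)
  | i :: is, r1, r2 =>
    match r1, r2 with
    | a :: t1, b :: t2 =>
      let p := pvGhost l1 l2 is t1 t2
      (|a - b| + p.1, pvAt l1 i * PySem.List.count l2 (pvAt l1 i) + p.2)
    | _, _ => (0, 0)

-- skipping used indices in the fold = folding over the filtered index list
theorem pv_foldl_if_skip (l u : List Int) :
    ∀ (js : List Int) (st : Option Int × Option Int),
      js.foldl (fun st i => if i ∈ u then st else pvGsunStep l st i) st
        = (js.filter (fun i => decide (i ∉ u))).foldl (pvGsunStep l) st := by
  intro js
  induction js with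
  | nil => intro st; rfl
  | cons j js ih =>
    intro st
    by_cases h : j ∈ u <;> simp [h, ih]

-- the strict-< running minimum from a `some` state: value is the min, index realises it
theorem pv_gsun_run (l : List Int) :
    ∀ (cs : List Int) (s i : Int),
      ∃ m i₀, cs.foldl (pvGsunStep l) (some s, some i) = (some m, some i₀)
        ∧ ((m = s ∧ i₀ = i) ∨ (i₀ ∈ cs ∧ m = pvAt l i₀))
        ∧ m ≤ s ∧ ∀ c ∈ cs, m ≤ pvAt l c := by
  intro cs
  induction cs with
  | nil => intro s i; exact ⟨s, i, rfl, Or.inl ⟨rfl, rfl⟩, le_refl _, by simp⟩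
  | cons c cs ih =>
    intro s i
    by_cases h : PySem.List.pyGetD l c 0 < s
    · obtain ⟨m, i₀, heq, hcase, hle, hall⟩ := ih (pvAt l c) c
      refine ⟨m, i₀, ?_, ?_, ?_, ?_⟩
      · simpa [List.foldl_cons, pvGsunStep, h, pvAt] using heq
      · rcases hcase with ⟨hm, hi⟩ | ⟨hi, hm⟩
        · exact Or.inr ⟨by simp [hi], by rw [hm, hi]⟩
        · exact Or.inr ⟨by simp [hi], hm⟩
      · calc m ≤ pvAt l c := hle
          _ ≤ s := le_of_lt h
      · intro x hx
        rcases List.mem_cons.mp hx with rfl | hx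
        · exact hle
        · exact hall x hx
    · obtain ⟨m, i₀, heq, hcase, hle, hall⟩ := ih s i
      refine ⟨m, i₀, ?_, hcase.imp id (fun ⟨hi, hm⟩ => ⟨List.mem_cons_of_mem _ hi, hm⟩), hle, ?_⟩
      · simpa [List.foldl_cons, pvGsunStep, h, pvAt] using heq
      · intro x hx
        rcases List.mem_cons.mp hx with rfl | hx
        · exact le_trans hle (not_lt.mp (by simpa [pvAt] using h))
        · exact hall x hx

-- pyGsun on an empty candidate list
theorem pv_gsun_nil (l u : List Int) (h : pvUnusedIdx l u = []) :
    pyGsun l u = (none, none) := by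
  unfold pyGsun
  rw [pv_foldl_if_skip]
  unfold pvUnusedIdx at h
  rw [h]
  rfl

-- pyGsun on a nonempty candidate list: returns min value with a realising unused index
theorem pv_gsun_cons (l u : List Int) (c : Int) (cs : List Int)
    (h : pvUnusedIdx l u = c :: cs) :
    ∃ m i₀, pyGsun l u = (some m, some i₀)
      ∧ i₀ ∈ pvUnusedIdx l u ∧ m = pvAt l i₀ ∧ ∀ j ∈ pvUnusedIdx l u, m ≤ pvAt l j := by
  obtain ⟨m, i₀, heq, hcase, hle, hall⟩ := pv_gsun_run l cs (pvAt l c) c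
  refine ⟨m, i₀, ?_, ?_, ?_, ?_⟩
  · unfold pyGsun
    rw [pv_foldl_if_skip]
    unfold pvUnusedIdx at h
    rw [h]
    simpa [List.foldl_cons, pvGsunStep, pvAt] using heq
  · rw [h]
    rcases hcase with ⟨_, hi⟩ | ⟨hi, _⟩
    · simp [hi]
    · simp [hi]
  · rcases hcase with ⟨hm, hi⟩ | ⟨_, hm⟩
    · rw [hm, hi]
    · exact hm
  · intro j hj
    rw [h] at hj
    rcases List.mem_cons.mp hj with rfl | hj
    · exact hle
    · exact hall j hj

-- appending the chosen index filters it out of the candidate list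
theorem pv_unusedIdx_append (l u : List Int) (i₀ : Int) :
    pvUnusedIdx l (u ++ [i₀]) = (pvUnusedIdx l u).filter (fun i => decide (i ≠ i₀)) := by
  unfold pvUnusedIdx
  rw [List.filter_filter]
  apply List.filter_congr
  intro x _
  by_cases h1 : x ∈ u <;> by_cases h2 : x = i₀ <;> simp [h1, h2]

theorem pv_nodup_unusedIdx (l u : List Int) : (pvUnusedIdx l u).Nodup := by
  unfold pvUnusedIdx
  exact (PySem.List.nodup_pyRange_one 0 (l.length : Int)).filter _

-- the new unused-value list is a permutation of the old one with one copy of the min removed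
theorem pv_unusedVals_step (l u : List Int) (i₀ : Int) (h : i₀ ∈ pvUnusedIdx l u) :
    (pvUnusedVals l (u ++ [i₀])).Perm ((pvUnusedVals l u).erase (pvAt l i₀)) := by
  have hnd := pv_nodup_unusedIdx l u
  have hfe : (pvUnusedIdx l u).filter (fun i => decide (i ≠ i₀)) = (pvUnusedIdx l u).erase i₀ := by
    rw [List.Nodup.erase_eq_filter hnd]
    apply List.filter_congr
    intro x _
    by_cases hx : x = i₀ <;> simp [hx]
  have hperm1 : (pvUnusedIdx l u).Perm (i₀ :: (pvUnusedIdx l u).erase i₀) :=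
    List.perm_cons_erase h
  have hmem : pvAt l i₀ ∈ pvUnusedVals l u := List.mem_map_of_mem h
  have hperm2 : (pvUnusedVals l u).Perm (pvAt l i₀ :: (pvUnusedVals l u).erase (pvAt l i₀)) :=
    List.perm_cons_erase hmem
  have hmap : (pvUnusedVals l u).Perm (pvAt l i₀ :: ((pvUnusedIdx l u).erase i₀).map (pvAt l)) := by
    unfold pvUnusedVals
    simpa using hperm1.map (pvAt l)
  have := (hmap.symm.trans hperm2).cons_inv
  unfold pvUnusedVals
  rw [pv_unusedIdx_append, hfe]
  exact this

-- head of the Python sort is the minimum; tail is the sort of the rest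
theorem pv_sorted_min_cons (rem : List Int) (m : Int) (hm : m ∈ rem)
    (hmin : ∀ x ∈ rem, m ≤ x) :
    PySem.List.sorted rem (fun x => x) false
      = m :: PySem.List.sorted (rem.erase m) (fun x => x) false := by
  apply PySem.List.sorted_id_eq_of_perm_of_pairwise
  · exact ((PySem.List.sorted_perm _ _ _).cons m).trans (List.perm_cons_erase hm).symm
  · rw [List.pairwise_cons]
    refine ⟨?_, ?_⟩
    · intro y hy
      have : y ∈ rem.erase m := (PySem.List.mem_sorted _ _ _ _).mp hy
      exact hmin y (List.mem_of_mem_erase this)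
    · exact PySem.List.sorted_pairwise _ _

-- MAIN LOOP INVARIANT: A's loop = the ghost recursion on the sorted unused values
theorem pv_loop_eq (l1 l2 : List Int) :
    ∀ (idxs : List Int) (td ts : Int) (u1 u2 : List Int),
      pvCalcLoopA l1 l2 idxs td ts u1 u2
        = (td + (pvGhost l1 l2 idxs (PySem.List.sorted (pvUnusedVals l1 u1) (fun x => x) false)
                   (PySem.List.sorted (pvUnusedVals l2 u2) (fun x => x) false)).1,
           ts + (pvGhost l1 l2 idxs (PySem.List.sorted (pvUnusedVals l1 u1) (fun x => x) false)
                   (PySem.List.sorted (pvUnusedVals l2 u2) (fun x => x) false)).2) := by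
  intro idxs
  induction idxs with
  | nil => intro td ts u1 u2; simp [pvCalcLoopA, pvGhost]
  | cons i is ih =>
    intro td ts u1 u2
    cases hi1 : pvUnusedIdx l1 u1 with
    | nil =>
      have hg1 := pv_gsun_nil l1 u1 hi1
      have hv1 : pvUnusedVals l1 u1 = [] := by unfold pvUnusedVals; rw [hi1]; rfl
      simp [pvCalcLoopA, hg1, hv1, pvGhost, pv_sorted_nil]
    | cons c cs =>
      cases hi2 : pvUnusedIdx l2 u2 with
      | nil =>
        have hg2 := pv_gsun_nil l2 u2 hi2
        have hv2 : pvUnusedVals l2 u2 = [] := by unfold pvUnusedVals; rw [hi2]; rfl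
        obtain ⟨m1, i₁, hg1, _, _, _⟩ := pv_gsun_cons l1 u1 c cs hi1
        simp [pvCalcLoopA, hg1, hg2, hv2, pvGhost, pv_sorted_nil]
      | cons c2 cs2 =>
        obtain ⟨m1, i₁, hg1, hmem1, hval1, hmin1⟩ := pv_gsun_cons l1 u1 c cs hi1
        obtain ⟨m2, i₂, hg2, hmem2, hval2, hmin2⟩ := pv_gsun_cons l2 u2 c2 cs2 hi2
        have hm1v : m1 ∈ pvUnusedVals l1 u1 := by
          rw [hval1]; exact List.mem_map_of_mem hmem1
        have hm2v : m2 ∈ pvUnusedVals l2 u2 := by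
          rw [hval2]; exact List.mem_map_of_mem hmem2
        have hmin1' : ∀ x ∈ pvUnusedVals l1 u1, m1 ≤ x := by
          intro x hx
          obtain ⟨j, hj, rfl⟩ := List.mem_map.mp hx
          exact hmin1 j hj
        have hmin2' : ∀ x ∈ pvUnusedVals l2 u2, m2 ≤ x := by
          intro x hx
          obtain ⟨j, hj, rfl⟩ := List.mem_map.mp hx
          exact hmin2 j hj
        have hs1 := pv_sorted_min_cons (pvUnusedVals l1 u1) m1 hm1v hmin1'
        have hs2 := pv_sorted_min_cons (pvUnusedVals l2 u2) m2 hm2v hmin2'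
        have hsp1 : PySem.List.sorted (pvUnusedVals l1 (u1 ++ [i₁])) (fun x => x) false
            = PySem.List.sorted ((pvUnusedVals l1 u1).erase m1) (fun x => x) false := by
          apply PySem.List.sorted_eq_sorted_of_perm _ _ _ (fun a b h => h)
          rw [hval1]; exact pv_unusedVals_step l1 u1 i₁ hmem1
        have hsp2 : PySem.List.sorted (pvUnusedVals l2 (u2 ++ [i₂])) (fun x => x) false
            = PySem.List.sorted ((pvUnusedVals l2 u2).erase m2) (fun x => x) false := by
          apply PySem.List.sorted_eq_sorted_of_perm _ _ _ (fun a b h => h)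
          rw [hval2]; exact pv_unusedVals_step l2 u2 i₂ hmem2
        rw [hs1, hs2]
        simp only [pvCalcLoopA, hg1, hg2, Option.getD_some]
        rw [ih, hsp1, hsp2]
        simp only [pvGhost, pvAt]
        simp only [Prod.mk.injEq]
        constructor <;> ring

-- ghost first component = the zip fold of B
theorem pv_ghost_fst (l1 l2 : List Int) :
    ∀ (idxs s1 s2 : List Int), s1.length ≤ idxs.length →
      (pvGhost l1 l2 idxs s1 s2).1 = ((s1.zip s2).map (fun p => |p.1 - p.2|)).sum := by
  intro idxs
  induction idxs with
  | nil =>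
    intro s1 s2 h
    have : s1 = [] := List.eq_nil_of_length_eq_zero (Nat.le_zero.mp h)
    subst this
    simp [pvGhost]
  | cons i is ih =>
    intro s1 s2 h
    cases s1 with
    | nil => simp [pvGhost]
    | cons a t1 =>
      cases s2 with
      | nil => simp [pvGhost]
      | cons b t2 =>
        simp [pvGhost, ih t1 t2 (Nat.le_of_succ_le_succ (by simpa using h))]

-- ghost second component = similarity over the first min-length indices
theorem pv_ghost_snd (l1 l2 : List Int) :
    ∀ (idxs s1 s2 : List Int), s1.length ≤ idxs.length →
      (pvGhost l1 l2 idxs s1 s2).2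
        = ((idxs.take (min s1.length s2.length)).map
            (fun i => pvAt l1 i * PySem.List.count l2 (pvAt l1 i))).sum := by
  intro idxs
  induction idxs with
  | nil =>
    intro s1 s2 h
    have : s1 = [] := List.eq_nil_of_length_eq_zero (Nat.le_zero.mp h)
    subst this
    simp [pvGhost]
  | cons i is ih =>
    intro s1 s2 h
    cases s1 with
    | nil => simp [pvGhost]
    | cons a t1 =>
      cases s2 with
      | nil => simp [pvGhost]
      | cons b t2 =>
        simp [pvGhost, ih t1 t2 (Nat.le_of_succ_le_succ (by simpa using h)),
          Nat.succ_min_succ, List.take_succ_cons]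

-- with no used indices, the unused values are the list itself
theorem pv_unusedVals_nil (l : List Int) : pvUnusedVals l [] = l := by
  unfold pvUnusedVals pvUnusedIdx pvAt
  simp [List.filter_eq_self.mpr]
  exact PySem.List.map_pyGetD_pyRange_zero l 0

-- prefix of a list as a map over range
theorem pv_take_eq_map_range (l : List Int) (k : Nat) (hk : k ≤ l.length) :
    l.take k = (List.range k).map (fun j => l.getD j 0) := by
  induction k generalizing l with
  | zero => simp
  | succ k ih =>
    cases l with
    | nil => simp at hk
    | cons x xs =>
      rw [List.range_succ_eq_map]
      simp [List.map_map, Function.comp,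
        ih xs (Nat.le_of_succ_le_succ hk)]

-- ===== VERDICT (by name: the statement is the Claim_ definition above) =====
-- assembly: A's result in closed form
theorem pv_A_closed (l1 l2 : List Int) :
    calc_total_distance_and_similarity_score l1 l2
      = ((((PySem.List.sorted l1 (fun x => x) false).zip
            (PySem.List.sorted l2 (fun x => x) false)).map (fun p => |p.1 - p.2|)).sum,
         ((l1.take (min l1.length l2.length)).map
            (fun x => x * PySem.List.count l2 x)).sum) := by
  have hidx : (PySem.List.pyRange 0 (l1.length : Int) 1).length = l1.length := by
    rw [PySem.List.length_pyRange_one]; omega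
  have hlen : (PySem.List.sorted l1 (fun x => x) false).length
      ≤ (PySem.List.pyRange 0 (l1.length : Int) 1).length := by
    rw [PySem.List.length_sorted, hidx]
  unfold calc_total_distance_and_similarity_score
  rw [pv_loop_eq, pv_unusedVals_nil, pv_unusedVals_nil]
  rw [pv_ghost_fst l1 l2 _ _ _ hlen, pv_ghost_snd l1 l2 _ _ _ hlen]
  refine Prod.ext (by simp) ?_
  simp only [PySem.List.length_sorted]
  have htake : (PySem.List.pyRange 0 (l1.length : Int) 1).take (min l1.length l2.length)
      = (List.range (min l1.length l2.length)).map (fun k : Nat => (k : Int)) := by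
    rw [PySem.List.pyRange_zero_natCast, ← List.map_take, List.take_range]
    congr 2
    omega
  rw [htake, List.map_map]
  rw [pv_take_eq_map_range l1 (min l1.length l2.length) (Nat.min_le_left _ _), List.map_map]
  rw [zero_add]
  refine congrArg _ (List.map_congr_left ?_)
  intro j hj
  simp [pvAt, List.getD]

-- B's result in the same closed form
theorem pv_B_closed (l1 l2 : List Int) :
    calc_total_distance_and_similarity_score_alt l1 l2
      = ((((PySem.List.sorted l1 (fun x => x) false).zip
            (PySem.List.sorted l2 (fun x => x) false)).map (fun p => |p.1 - p.2|)).sum,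
         ((l1.take (min l1.length l2.length)).map
            (fun x => x * PySem.List.count l2 x)).sum) := by
  simp only [calc_total_distance_and_similarity_score_alt]
  have hk0 : (0:Int) ≤ min (l1.length : Int) (l2.length : Int) := by
    have := Int.natCast_nonneg l1.length; omega
  have hkt : (min (l1.length : Int) (l2.length : Int)).toNat = min l1.length l2.length := by
    omega
  rw [PySem.Dict.foldl_insert_getD_add_one_eq_counter]
  rw [PySem.List.slice_to l1 hk0, hkt]
  refine Prod.ext ?_ ?_
  · simp [PySem.List.foldl_add]
  · simp only [PySem.List.foldl_add, PySem.Dict.getD_counter, PySem.List.count_eq]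
    simp

-- ===== VERDICT (by name: the statement is the Claim_ definition above) =====
theorem calc_total_distance_and_similarity_score_spec : Claim_equal_calc_total_distance_and_similarity_score := by
  intro l1 l2 _
  unfold Spec_calc_total_distance_and_similarity_score
  rw [pv_A_closed, pv_B_closed]
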